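-- pv_equiv track=rewrite | github.com/fredhope2000/messagescorpus | messagescorpus/shared_utils.py | get_primary_other_name
-- ===== SOURCE A (Python) =====
-- def get_primary_other_name(name, name_groups):
--     """
--     Checks the name groups to find the primary name associated with this name.
--     """
--
--     if name in name_groups:
--         return name
--     found_primary_name = None
--     for primary_name, alt_names in name_groups.items():
--         if name in alt_names:
--             if found_primary_name:
--                 raise KeyError(f'Other name "{name}" listed under multiple primary names ("{found_primary_name}" and "{primary_name}")')
--             found_primary_name = primary_name
--     return found_primary_name if found_primary_name is not None else name
-- ===== SOURCE B (Python) =====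
-- def get_primary_other_name(name, name_groups):
--     """
--     Checks the name groups to find the primary name associated with this name.
--     """
--     if name in name_groups:
--         return name
--     owners = {}
--     for primary, alt_names in name_groups.items():
--         for alt in dict.fromkeys(alt_names):
--             owners.setdefault(alt, []).append(primary)
--     primaries = owners.get(name, [])
--     if len(primaries) > 1:
--         raise KeyError(f'Other name "{name}" listed under multiple primary names ("{primaries[0]}" and "{primaries[1]}")')
--     return primaries[0] if primaries else name
-- ===== Notes on version B (the rewrite author's own statement) =====
-- stated objective: alternative
-- what changed: B builds a reverse index (alias -> list of primaries) as a dict in one grouping pass and then answers by a single dict lookup, instead of A's stateful scan of the groups testing membership with a mutable found-flag.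
-- outside the precondition, e.g. on get_primary_other_name('x', {'': ['x'], 'b': ['x']}): A returns 'b', B raises KeyError; on get_primary_other_name('x', {'a': ['x'], 'b': ['x']}): A raises KeyError, B raises KeyError
import Mathlib
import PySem

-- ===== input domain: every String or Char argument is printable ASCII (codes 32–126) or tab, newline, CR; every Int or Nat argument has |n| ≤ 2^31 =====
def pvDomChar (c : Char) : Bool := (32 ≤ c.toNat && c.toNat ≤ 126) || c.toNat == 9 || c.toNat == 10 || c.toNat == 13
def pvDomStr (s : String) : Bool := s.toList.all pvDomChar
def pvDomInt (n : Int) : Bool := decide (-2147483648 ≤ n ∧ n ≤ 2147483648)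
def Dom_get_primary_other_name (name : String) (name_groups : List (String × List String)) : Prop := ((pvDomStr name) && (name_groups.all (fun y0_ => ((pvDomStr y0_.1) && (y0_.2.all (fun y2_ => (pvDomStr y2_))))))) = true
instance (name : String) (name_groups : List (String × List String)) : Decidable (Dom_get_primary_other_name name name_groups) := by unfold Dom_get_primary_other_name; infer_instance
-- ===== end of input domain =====

-- B answers via a reverse index (alias -> primaries) built in one grouping pass, instead of
-- A's stateful membership scan; return values agree on Pre_.

-- ===== PORT A =====
-- the for-loop over name_groups.items() with the mutable 'found_primary_name';
-- result 'none' models the in-loop 'raise KeyError' (outside Pre_), 'some found' a normal fall-through.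
def pvGoA (name : String) (found : Option String) : List (String × List String) → Option (Option String)
  | [] => some found
  | (primary, alts) :: rest =>
      if alts.contains name then
        -- 'if found_primary_name:' — Python truthiness: a non-None, non-empty string
        if (match found with | some f => !(f == "") | none => false) then none
        else pvGoA name (some primary) rest
      else pvGoA name found rest

def get_primary_other_name (name : String) (name_groups : List (String × List String)) : String :=
  if (name_groups.map Prod.fst).contains name then name
  else
    match pvGoA name none name_groups with
    | some (some f) => f          -- found_primary_name is not None
    | some none => name           -- found_primary_name is None
    | none => ""                  -- KeyError raised (excluded by Pre_); junk value

-- ===== PORT B =====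
def get_primary_other_name_alt (name : String) (name_groups : List (String × List String)) : String :=
  if (name_groups.map Prod.fst).contains name then name
  else
    -- owners.setdefault(alt, []).append(primary) over the deduped alt names of each group
    let owners : PySem.Dict String (List String) :=
      name_groups.foldl
        (fun d p => (PySem.List.dedup p.2).foldl
          (fun d alt => d.modify alt [] (· ++ [p.1])) d)
        PySem.Dict.empty
    let primaries := owners.getD name []
    if primaries.length > 1 then ""  -- KeyError raised (excluded by Pre_); junk value
    else
      match primaries with
      | m :: _ => m
      | [] => name

-- ===== PRECONDITION & SPEC =====
-- Pre_ excludes inputs where name is not a key yet occurs in the alt-name lists of two or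
-- more entries: there A raises KeyError — except when the first matching primary is the
-- empty string, where A's truthiness test accidentally returns a later primary — and B
-- raises KeyError on all of them.
def Pre_get_primary_other_name (name : String) (name_groups : List (String × List String)) : Prop :=
  (name_groups.map Prod.fst).contains name = true ∨
  (name_groups.filter (fun p => p.2.contains name)).length ≤ 1
instance (name : String) (name_groups : List (String × List String)) : Decidable (Pre_get_primary_other_name name name_groups) := by unfold Pre_get_primary_other_name; infer_instance

def pvWitness_get_primary_other_name : String × (List (String × List String)) :=
  ("ringo", [("richard", ["ringo", "rich"]), ("paul", ["macca"])])

def Spec_get_primary_other_name (name : String) (name_groups : List (String × List String)) (out : String) : Prop := out = get_primary_other_name_alt name name_groups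
instance (name : String) (name_groups : List (String × List String)) (out : String) : Decidable (Spec_get_primary_other_name name name_groups out) := by unfold Spec_get_primary_other_name; infer_instance

-- ===== CLAIM (what is proved, stated in full; the proofs are below) =====
def Claim_equal_get_primary_other_name : Prop := ∀ (name : String) (name_groups : List (String × List String)), Dom_get_primary_other_name name name_groups → Pre_get_primary_other_name name name_groups → Spec_get_primary_other_name name name_groups (get_primary_other_name name name_groups)

-- ===== LEMMAS AND PROOFS =====

-- A's loop when no group contains name: the accumulator passes through.
theorem pvGoA_no_match (name : String) (acc : Option String)
    (gs : List (String × List String))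
    (h : gs.filter (fun p => decide (name ∈ p.2)) = []) :
    pvGoA name acc gs = some acc := by
  induction gs generalizing acc with
  | nil => rfl
  | cons g rest ih =>
      obtain ⟨p, alts⟩ := g
      simp only [List.filter_cons, decide_eq_true_eq] at h
      by_cases hm : name ∈ alts
      · rw [if_pos hm] at h
        exact (List.cons_ne_nil _ _ h).elim
      · rw [if_neg hm] at h
        simp only [pvGoA, List.contains_eq_mem]
        rw [if_neg (by simpa using hm)]
        exact ih acc h

-- A's loop when at most one group contains name: it returns the head of the matching primaries.
theorem pvGoA_le_one (name : String) (gs : List (String × List String))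
    (h : (gs.filter (fun p => decide (name ∈ p.2))).length ≤ 1) :
    pvGoA name none gs =
      some (((gs.filter (fun p => decide (name ∈ p.2))).map Prod.fst).head?) := by
  induction gs with
  | nil => rfl
  | cons g rest ih =>
      obtain ⟨p, alts⟩ := g
      simp only [List.filter_cons, decide_eq_true_eq] at h ⊢
      by_cases hm : name ∈ alts
      · rw [if_pos hm] at h ⊢
        rw [List.length_cons] at h
        have hrest : rest.filter (fun p => decide (name ∈ p.2)) = [] :=
          List.eq_nil_of_length_eq_zero (by omega)
        simp only [pvGoA, List.contains_eq_mem]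
        rw [if_pos (by simpa using hm)]
        simp only [Bool.false_eq_true, if_false, List.map_cons, List.head?_cons]
        exact pvGoA_no_match name (some p) rest hrest
      · rw [if_neg hm] at h ⊢
        simp only [pvGoA, List.contains_eq_mem]
        rw [if_neg (by simpa using hm)]
        exact ih h

-- a Nodup list mapped to (·, v) pairs and filtered on the key yields at most the one pair
theorem filter_map_pair_nodup (name v : String) (l : List String) (hnd : l.Nodup) :
    (l.map (fun a => (a, v))).filter (fun q => q.1 == name) =
      if name ∈ l then [(name, v)] else [] := by
  induction l with
  | nil => simp
  | cons a rest ih =>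
      obtain ⟨ha, hrest⟩ := List.nodup_cons.mp hnd
      by_cases h : a = name
      · subst h
        have hr : (rest.map (fun x => (x, v))).filter (fun q => q.1 == a) = [] := by
          rw [ih hrest, if_neg ha]
        simp [hr]
      · simp only [List.map_cons, List.filter_cons]
        rw [ih hrest]
        simp [h, Ne.symm h]

-- B's reverse index looked up at name = the primaries of the groups containing name, in order.
theorem owners_flat (gs : List (String × List String)) (d : PySem.Dict String (List String)) :
    gs.foldl (fun d p => (PySem.List.dedup p.2).foldl
        (fun d alt => d.modify alt [] (· ++ [p.1])) d) d
      = (gs.flatMap (fun p => (PySem.List.dedup p.2).map (fun a => (a, p.1)))).foldl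
          (fun d q => d.modify q.1 [] (· ++ [q.2])) d := by
  induction gs generalizing d with
  | nil => rfl
  | cons g rest ih =>
      simp only [List.foldl_cons, List.flatMap_cons, List.foldl_append, List.foldl_map]
      exact ih _

theorem owners_pairs_filter (name : String) (gs : List (String × List String)) :
    ((gs.flatMap (fun p => (PySem.List.dedup p.2).map (fun a => (a, p.1)))).filter
       (fun q => q.1 == name)).map (·.2) =
      ((gs.filter (fun p => decide (name ∈ p.2))).map Prod.fst) := by
  rw [List.filter_flatMap]
  induction gs with
  | nil => rfl
  | cons g rest ih =>
      simp only [List.flatMap_cons, List.filter_cons, List.map_append]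
      rw [filter_map_pair_nodup name g.1 (PySem.List.dedup g.2) (PySem.List.nodup_dedup g.2)]
      rw [ih]
      by_cases hm : name ∈ g.2
      · rw [if_pos (by simpa [PySem.List.mem_dedup] using hm)]
        simp [hm]
      · rw [if_neg (by simpa [PySem.List.mem_dedup] using hm)]
        simp [hm]

theorem owners_getD (name : String) (gs : List (String × List String)) :
    ((gs.foldl
        (fun d p => (PySem.List.dedup p.2).foldl
          (fun d alt => d.modify alt [] (· ++ [p.1])) d)
        PySem.Dict.empty).getD name []) =
      ((gs.filter (fun p => decide (name ∈ p.2))).map Prod.fst) := by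
  rw [owners_flat, PySem.Dict.getD_foldl_modify_append, PySem.Dict.getD_empty,
    List.nil_append, owners_pairs_filter]

-- ===== VERDICT (by name: the statement is the Claim_ definition above) =====
theorem get_primary_other_name_spec : Claim_equal_get_primary_other_name := by
  intro name name_groups _ hpre
  unfold Pre_get_primary_other_name at hpre
  unfold Spec_get_primary_other_name get_primary_other_name get_primary_other_name_alt
  by_cases hk : (name_groups.map Prod.fst).contains name = true
  · rw [if_pos hk, if_pos hk]
  · rcases hpre with hpre | hpre
    · exact absurd hpre hk
    · have hpre' : (name_groups.filter (fun p => decide (name ∈ p.2))).length ≤ 1 := by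
        simpa using hpre
      rw [if_neg hk, if_neg hk]
      rw [pvGoA_le_one name name_groups hpre']
      simp only [owners_getD]
      rw [if_neg (by simp; omega)]
      cases hfl : (name_groups.filter (fun p => decide (name ∈ p.2))).map Prod.fst with
      | nil => simp
      | cons m rest => simp
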